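-- pv_equiv track=rewrite | github.com/541741106/IMPACT_HOI | tools/fill_gaps_from_source.py | infer_verb_noun
-- ===== SOURCE A (Python) =====
-- from typing import Any, DefaultDict, Dict, Iterable, List, Optional, Tuple
--
-- def normalize_name(name: str) -> str:
--     return " ".join(str(name).strip().split())
--
-- KNOWN_VERB_PREFIXES = [
--     "pick_up",
--     "hand_tighten",
--     "hand_loosen",
--     "tighten",
--     "loosen",
--     "remove",
--     "insert",
--     "mount",
--     "attach",
--     "detach",
--     "dismount",
--     "extract",
--     "place",
--     "store",
--     "transfer",
--     "hold",
--     "flip",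
--     "thread",
--     "adjust",
--     "align",
--     "seat",
-- ]
--
-- def infer_verb_noun(action_name: str) -> Tuple[Optional[str], Optional[str]]:
--     action_name = normalize_name(action_name)
--     if action_name == "null":
--         return None, None
--     for v in sorted(KNOWN_VERB_PREFIXES, key=len, reverse=True):
--         pref = v + "_"
--         if action_name.startswith(pref):
--             noun = action_name[len(pref) :]
--             return v, (noun if noun else None)
--     if "_" in action_name:
--         v, n = action_name.split("_", 1)
--         return v, (n if n else None)
--     return action_name, None
-- ===== SOURCE B (Python) =====
-- from typing import Optional, Tuple
--
-- def normalize_name(name: str) -> str: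
--     return " ".join(str(name).strip().split())
--
-- KNOWN_VERB_PREFIXES = [
--     "pick_up", "hand_tighten", "hand_loosen", "tighten", "loosen", "remove",
--     "insert", "mount", "attach", "detach", "dismount", "extract", "place",
--     "store", "transfer", "hold", "flip", "thread", "adjust", "align", "seat",
-- ]
--
-- # built once: every known verb with its mandatory trailing underscore
-- _PREFIX_SET = {v + "_" for v in KNOWN_VERB_PREFIXES}
--
-- def infer_verb_noun(action_name: str) -> Tuple[Optional[str], Optional[str]]:
--     action_name = normalize_name(action_name)
--     if action_name == "null":
--         return None, None
--     i1 = action_name.find("_")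
--     if i1 == -1:
--         return action_name, None
--     i2 = action_name.find("_", i1 + 1)
--     # a known prefix ends at the first or second underscore; try the longer cut first
--     for j in (i2, i1):
--         if j != -1 and action_name[: j + 1] in _PREFIX_SET:
--             return action_name[:j], (action_name[j + 1:] or None)
--     return action_name[:i1], (action_name[i1 + 1:] or None)
-- ===== Notes on version B (the rewrite author's own statement) =====
-- stated objective: alternative
-- what changed: Instead of sorting the 21 known prefixes by length and testing startswith for each, B locates the first two underscores with str.find and looks up the two candidate cuts (longer first) in a prefix set built once at module level.
import Mathlib
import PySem

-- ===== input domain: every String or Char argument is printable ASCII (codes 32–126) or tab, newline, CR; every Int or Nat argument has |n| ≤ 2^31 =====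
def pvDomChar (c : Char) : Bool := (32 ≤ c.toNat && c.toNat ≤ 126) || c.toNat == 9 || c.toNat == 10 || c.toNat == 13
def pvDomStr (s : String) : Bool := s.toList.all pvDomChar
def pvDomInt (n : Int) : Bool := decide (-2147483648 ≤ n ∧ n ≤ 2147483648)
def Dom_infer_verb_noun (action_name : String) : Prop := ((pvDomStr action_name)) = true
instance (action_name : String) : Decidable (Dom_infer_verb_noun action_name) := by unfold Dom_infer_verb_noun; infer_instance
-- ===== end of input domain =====

-- B replaces A's sort-and-scan over all 21 prefixes by two str.find calls and a lookup of the two candidate cuts in a prefix set built once.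

-- ===== PORT A =====
-- module constant KNOWN_VERB_PREFIXES (shared context of both implementations)
def pvKnownVerbPrefixes : List String :=
  ["pick_up", "hand_tighten", "hand_loosen", "tighten", "loosen", "remove",
   "insert", "mount", "attach", "detach", "dismount", "extract", "place",
   "store", "transfer", "hold", "flip", "thread", "adjust", "align", "seat"]

-- module helper normalize_name (shared by both implementations): " ".join(str(name).strip().split())
def pvNormalize (s : List Char) : List Char :=
  PySem.Chars.join [' '] (PySem.Chars.split₀ (PySem.Chars.strip s))

-- the for-loop over sorted(KNOWN_VERB_PREFIXES, key=len, reverse=True) with early return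
def pvScanA : List String → List Char → Option (Option String × Option String)
  | [], _ => none
  | v :: vs, t =>
    let pref := v.toList ++ ['_']
    if PySem.Chars.startswith t pref then
      let noun := PySem.Chars.slice t (some (pref.length : Int)) none
      some (some v, if noun.isEmpty then none else some (String.ofList noun))
    else pvScanA vs t

def infer_verb_noun (action_name : String) : Option String × Option String :=
  let t := pvNormalize action_name.toList
  if t = "null".toList then (none, none) else
  match pvScanA (PySem.List.sorted pvKnownVerbPrefixes (fun v => PySem.Str.len v) true) t with
  | some res => res
  | none =>
    if PySem.Chars.isIn ['_'] t then
      let parts := PySem.Chars.splitOnMax t ['_'] 1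
      let v := parts.getD 0 []
      let n := parts.getD 1 []
      (some (String.ofList v), if n.isEmpty then none else some (String.ofList n))
    else (some (String.ofList t), none)

-- ===== PORT B =====
-- _PREFIX_SET = {v + "_" for v in KNOWN_VERB_PREFIXES}, built once
def pvPrefixSet : PySem.Set (List Char) :=
  PySem.Set.ofList (pvKnownVerbPrefixes.map (fun v => v.toList ++ ['_']))

-- the for-loop 'for j in (i2, i1)' with early return
def pvTryCands : List Int → List Char → Option (Option String × Option String)
  | [], _ => none
  | j :: js, t =>
    if j ≠ -1 ∧ PySem.Set.contains pvPrefixSet (PySem.Chars.slice t none (some (j + 1))) then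
      some (some (String.ofList (PySem.Chars.slice t none (some j))),
            let noun := PySem.Chars.slice t (some (j + 1)) none
            if noun.isEmpty then none else some (String.ofList noun))
    else pvTryCands js t

def infer_verb_noun_alt (action_name : String) : Option String × Option String :=
  let t := pvNormalize action_name.toList
  if t = "null".toList then (none, none) else
  let i1 := PySem.Chars.find t ['_']
  if i1 = -1 then (some (String.ofList t), none) else
  let i2 := PySem.Chars.findFrom t ['_'] (i1 + 1) none
  match pvTryCands [i2, i1] t with
  | some res => res
  | none =>
    (some (String.ofList (PySem.Chars.slice t none (some i1))),
     let noun := PySem.Chars.slice t (some (i1 + 1)) none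
     if noun.isEmpty then none else some (String.ofList noun))

-- ===== PRECONDITION & SPEC =====
def Spec_infer_verb_noun (action_name : String) (out : Option String × Option String) : Prop := out = infer_verb_noun_alt action_name
instance (action_name : String) (out : Option String × Option String) : Decidable (Spec_infer_verb_noun action_name out) := by unfold Spec_infer_verb_noun; infer_instance

-- ===== CLAIM (what is proved, stated in full; the proofs are below) =====
def Claim_equal_infer_verb_noun : Prop := ∀ (action_name : String), Dom_infer_verb_noun action_name → Spec_infer_verb_noun action_name (infer_verb_noun action_name)

-- ===== LEMMAS AND PROOFS =====

theorem pv_sorted_eq : PySem.List.sorted pvKnownVerbPrefixes (fun v => PySem.Str.len v) true =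
  ["hand_tighten","hand_loosen","dismount","transfer","pick_up","tighten","extract","loosen","remove","insert","attach","detach","thread","adjust","mount","place","store","align","hold","flip","seat"] := by decide

theorem pv_pair_fact : ∀ v ∈ pvKnownVerbPrefixes, ∀ w ∈ pvKnownVerbPrefixes,
    (v.toList ++ ['_'] <+: w.toList ++ ['_']) → v = w := by decide

theorem pv_find_go_prefix (a : List Char) (r : List Char) :
    '_' ∉ a → ∀ k : Nat, PySem.Chars.find.go ['_'] (a ++ '_' :: r) k = (k : Int) + a.length := by
  induction a with
  | nil => intro _ k; simp [PySem.Chars.find.go, List.isPrefixOf]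
  | cons c cs ih =>
    intro h k
    simp only [List.mem_cons, not_or] at h
    simp [PySem.Chars.find.go, List.isPrefixOf, h.1, ih h.2 (k+1)]
    omega

theorem pv_find_go_none (a : List Char) : '_' ∉ a → ∀ k : Nat, PySem.Chars.find.go ['_'] a k = -1 := by
  induction a with
  | nil => intro _ k; simp [PySem.Chars.find.go, List.isPrefixOf]
  | cons c cs ih =>
    intro h k
    simp only [List.mem_cons, not_or] at h
    simp [PySem.Chars.find.go, List.isPrefixOf, h.1, ih h.2 (k+1)]

theorem pv_find_prefix (a r : List Char) (h : '_' ∉ a) :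
    PySem.Chars.find (a ++ '_' :: r) ['_'] = a.length := by
  simp [PySem.Chars.find, pv_find_go_prefix a r h 0]

theorem pv_find_none (a : List Char) (h : '_' ∉ a) : PySem.Chars.find a ['_'] = -1 := by
  simp [PySem.Chars.find, pv_find_go_none a h 0]

theorem pv_go_m0 : ∀ (fuel : Nat) (l cur : List Char) (acc : List (List Char)),
    PySem.Chars.splitOnMax.go ['_'] fuel 0 l cur acc = ((cur.reverse ++ l) :: acc).reverse := by
  intro fuel l cur acc
  cases fuel with
  | zero => simp [PySem.Chars.splitOnMax.go]
  | succ f => cases l with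
    | nil => simp [PySem.Chars.splitOnMax.go]
    | cons c cs => simp [PySem.Chars.splitOnMax.go]

theorem pv_go_one (a : List Char) : ∀ (r cur : List Char) (acc : List (List Char)) (fuel : Nat),
    '_' ∉ a → a.length + 1 ≤ fuel →
    PySem.Chars.splitOnMax.go ['_'] fuel 1 (a ++ '_' :: r) cur acc
      = (r :: (cur.reverse ++ a) :: acc).reverse := by
  induction a with
  | nil =>
    intro r cur acc fuel _ hf
    cases fuel with
    | zero => omega
    | succ f =>
      simp [PySem.Chars.splitOnMax.go, List.isPrefixOf, pv_go_m0]
  | cons c cs ih =>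
    intro r cur acc fuel ha hf
    simp only [List.mem_cons, not_or] at ha
    cases fuel with
    | zero => omega
    | succ f =>
      simp only [List.cons_append]
      rw [show PySem.Chars.splitOnMax.go ['_'] (f+1) 1 (c :: (cs ++ '_' :: r)) cur acc
            = PySem.Chars.splitOnMax.go ['_'] f 1 (cs ++ '_' :: r) (c :: cur) acc from by
        simp [PySem.Chars.splitOnMax.go, List.isPrefixOf, ha.1]]
      rw [ih r (c :: cur) acc f ha.2 (by simpa using Nat.lt_succ_iff.mp hf)]
      simp

theorem pv_splitMax_one (a r : List Char) (h : '_' ∉ a) :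
    PySem.Chars.splitOnMax (a ++ '_' :: r) ['_'] 1 = [a, r] := by
  unfold PySem.Chars.splitOnMax
  norm_num
  rw [pv_go_one a r [] [] _ h (by simp)]
  simp



theorem pv_findFrom (t : List Char) (st : Nat) (hst : st ≤ t.length) :
    PySem.Chars.findFrom t ['_'] (st : Int) none
      = if PySem.Chars.find (t.drop st) ['_'] = -1 then -1
        else (st : Int) + PySem.Chars.find (t.drop st) ['_'] := by
  unfold PySem.Chars.findFrom
  have h1 : ¬ ((t.length : Int) < (st : Int)) := by exact_mod_cast not_lt.mpr hst
  have h2 : ¬ ((st : Int) < 0) := by omega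
  simp [h1, h2, List.take_length]

theorem pv_slice_prefix (t : List Char) (x : Int) : PySem.List.slice t none (some x) <+: t := by
  rcases le_or_gt 0 x with h | h
  · rw [PySem.List.slice_to t h]; exact List.take_prefix _ t
  · obtain ⟨k, hk, rfl⟩ : ∃ k : Nat, 0 < k ∧ x = -(k : Int) := ⟨x.natAbs, by omega, by omega⟩
    rw [PySem.List.slice_to_neg_natCast t k hk]; exact List.take_prefix _ t

theorem pv_contains_iff (x : List Char) :
    PySem.Set.contains pvPrefixSet x = true ↔ ∃ v ∈ pvKnownVerbPrefixes, x = v.toList ++ ['_'] := by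
  rw [PySem.Set.contains_iff]
  unfold pvPrefixSet
  rw [PySem.Set.mem_ofList, List.mem_map]
  constructor
  · rintro ⟨v, hv, rfl⟩; exact ⟨v, hv, rfl⟩
  · rintro ⟨v, hv, rfl⟩; exact ⟨v, hv, rfl⟩

theorem pv_mem_sorted (v : String) :
    v ∈ PySem.List.sorted pvKnownVerbPrefixes (fun v => PySem.Str.len v) true
      ↔ v ∈ pvKnownVerbPrefixes := by
  rw [pv_sorted_eq]
  simp [pvKnownVerbPrefixes]
  tauto

theorem pv_match_uniq {v w : String} {t : List Char}
    (hv : v ∈ pvKnownVerbPrefixes) (hw : w ∈ pvKnownVerbPrefixes)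
    (h1 : v.toList ++ ['_'] <+: t) (h2 : w.toList ++ ['_'] <+: t) : v = w := by
  rcases List.prefix_or_prefix_of_prefix h1 h2 with h | h
  · exact pv_pair_fact v hv w hw h
  · exact (pv_pair_fact w hw v hv h).symm

theorem pv_scan_none (L : List String) (t : List Char)
    (h : ∀ v ∈ L, ¬ (v.toList ++ ['_'] <+: t)) : pvScanA L t = none := by
  induction L with
  | nil => rfl
  | cons w ws ih =>
    have hw : ¬ PySem.Chars.startswith t (w.toList ++ ['_']) = true := by
      rw [PySem.Chars.startswith_iff]; exact h w (List.mem_cons_self ..)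
    simp only [pvScanA, hw, Bool.false_eq_true, if_false]
    exact ih (fun v hv => h v (List.mem_cons_of_mem _ hv))

theorem pv_scan_mem (L : List String) (v : String) (t : List Char)
    (hv : v ∈ L) (hm : v.toList ++ ['_'] <+: t)
    (hu : ∀ w ∈ L, w.toList ++ ['_'] <+: t → w = v) :
    pvScanA L t = some (some v,
      let noun := PySem.Chars.slice t (some (((v.toList ++ ['_']).length : Nat) : Int)) none
      if noun.isEmpty then none else some (String.ofList noun)) := by
  induction L with
  | nil => cases hv
  | cons w ws ih =>
    by_cases hw : w.toList ++ ['_'] <+: t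
    · have : w = v := hu w (List.mem_cons_self ..) hw
      subst this
      have hs : PySem.Chars.startswith t (w.toList ++ ['_']) = true := by
        rw [PySem.Chars.startswith_iff]; exact hw
      simp only [pvScanA, hs, if_true]
    · have hsw : ¬ PySem.Chars.startswith t (w.toList ++ ['_']) = true := by
        rw [PySem.Chars.startswith_iff]; exact hw
      have hv' : v ∈ ws := by
        rcases List.mem_cons.mp hv with rfl | h
        · exact absurd hm hw
        · exact h
      simp only [pvScanA, hsw, Bool.false_eq_true, if_false]
      exact ih hv' (fun u hu' h' => hu u (List.mem_cons_of_mem _ hu') h')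


theorem pv_exists_first (r : List Char) (h : '_' ∈ r) :
    ∃ b r2, r = b ++ '_' :: r2 ∧ '_' ∉ b := by
  induction r with
  | nil => cases h
  | cons c cs ih =>
    by_cases hc : c = '_'
    · exact ⟨[], cs, by simp [hc], by simp⟩
    · rcases List.mem_cons.mp h with h' | h'
      · exact absurd h'.symm hc
      · obtain ⟨b, r2, rfl, hb⟩ := ih h'
        exact ⟨c :: b, r2, by simp, by simp [hb]; exact fun h2 => hc h2.symm⟩

theorem pv_two_token : ∀ v ∈ pvKnownVerbPrefixes, '_' ∈ v.toList →
    v = "pick_up" ∨ v = "hand_tighten" ∨ v = "hand_loosen" := by decide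

theorem pv_try_none (js : List Int) (t : List Char)
    (h : ∀ w ∈ pvKnownVerbPrefixes, ¬ (w.toList ++ ['_'] <+: t)) :
    pvTryCands js t = none := by
  induction js with
  | nil => rfl
  | cons j js ih =>
    have hc : ¬ (j ≠ -1 ∧ PySem.Set.contains pvPrefixSet (PySem.Chars.slice t none (some (j + 1))) = true) := by
      rintro ⟨-, hc⟩
      obtain ⟨w, hw, heq⟩ := (pv_contains_iff _).mp hc
      have hp : PySem.Chars.slice t none (some (j + 1)) <+: t := pv_slice_prefix t (j + 1)
      rw [heq] at hp
      exact h w hw hp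
    simp only [pvTryCands]
    rw [if_neg hc]
    exact ih

-- proof-side copies of the two function bodies (definitionally equal to the ports)
def pvAcore (t : List Char) : Option String × Option String :=
  if t = "null".toList then (none, none) else
  match pvScanA (PySem.List.sorted pvKnownVerbPrefixes (fun v => PySem.Str.len v) true) t with
  | some res => res
  | none =>
    if PySem.Chars.isIn ['_'] t then
      let parts := PySem.Chars.splitOnMax t ['_'] 1
      let v := parts.getD 0 []
      let n := parts.getD 1 []
      (some (String.ofList v), if n.isEmpty then none else some (String.ofList n))
    else (some (String.ofList t), none)

def pvBcore (t : List Char) : Option String × Option String :=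
  if t = "null".toList then (none, none) else
  let i1 := PySem.Chars.find t ['_']
  if i1 = -1 then (some (String.ofList t), none) else
  let i2 := PySem.Chars.findFrom t ['_'] (i1 + 1) none
  match pvTryCands [i2, i1] t with
  | some res => res
  | none =>
    (some (String.ofList (PySem.Chars.slice t none (some i1))),
     let noun := PySem.Chars.slice t (some (i1 + 1)) none
     if noun.isEmpty then none else some (String.ofList noun))

-- A's loop returns (v, rest) when the input is v ++ "_" ++ r for a known verb v
theorem pv_A_hit (v : String) (hv : v ∈ pvKnownVerbPrefixes) (r : List Char) :
    pvScanA (PySem.List.sorted pvKnownVerbPrefixes (fun v => PySem.Str.len v) true)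
        ((v.toList ++ ['_']) ++ r)
      = some (some v, if r.isEmpty then none else some (String.ofList r)) := by
  have hm : v.toList ++ ['_'] <+: (v.toList ++ ['_']) ++ r := List.prefix_append _ _
  rw [pv_scan_mem _ v _ ((pv_mem_sorted v).mpr hv) hm
      (fun w hw h' => pv_match_uniq ((pv_mem_sorted w).mp hw) hv h' hm)]
  have hlen : (v.toList ++ ['_']).length = v.toList.length + 1 := by simp
  simp only [PySem.Chars.slice, hlen]
  rw [PySem.List.slice_from_natCast]
  rw [List.drop_left' (by simp)]

-- B's candidate loop hits when the head candidate cuts exactly after a known verb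
theorem pv_try_hit (v : String) (hv : v ∈ pvKnownVerbPrefixes) (r : List Char) (js : List Int) :
    pvTryCands (((v.toList.length : Nat) : Int) :: js) ((v.toList ++ ['_']) ++ r)
      = some (some v, if r.isEmpty then none else some (String.ofList r)) := by
  have hc1 : ((v.toList.length : Nat) : Int) + 1 = (((v.toList.length + 1 : Nat)) : Int) := by push_cast; ring
  have htake : ((v.toList ++ ['_']) ++ r).take (v.toList.length + 1) = v.toList ++ ['_'] :=
    List.take_left' (by simp)
  have hcond : (((v.toList.length : Nat) : Int) ≠ -1) ∧
      PySem.Set.contains pvPrefixSet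
        (PySem.Chars.slice ((v.toList ++ ['_']) ++ r) none (some (((v.toList.length : Nat) : Int) + 1))) = true := by
    refine ⟨by omega, ?_⟩
    rw [hc1]
    simp only [PySem.Chars.slice]
    rw [PySem.List.slice_to_natCast, htake]
    exact (pv_contains_iff _).mpr ⟨v, hv, rfl⟩
  simp only [pvTryCands]
  rw [if_pos hcond]
  have htk : ((v.toList ++ ['_']) ++ r).take v.toList.length = v.toList := by
    rw [List.append_assoc]; exact List.take_left' rfl
  have hdr : ((v.toList ++ ['_']) ++ r).drop (v.toList.length + 1) = r :=
    List.drop_left' (by simp)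
  simp only [PySem.Chars.slice, hc1]
  rw [PySem.List.slice_to_natCast, PySem.List.slice_from_natCast, htk, hdr,
      String.ofList_toList]

-- B's candidate loop skips the second-underscore cut when the first token alone is a verb
theorem pv_try_skip (v : String) (hv : v ∈ pvKnownVerbPrefixes) (b r2 : List Char) (js : List Int) :
    pvTryCands ((((v.toList.length + 1 + b.length : Nat)) : Int) :: js)
        ((v.toList ++ ['_']) ++ (b ++ '_' :: r2))
      = pvTryCands js ((v.toList ++ ['_']) ++ (b ++ '_' :: r2)) := by
  set t := (v.toList ++ ['_']) ++ (b ++ '_' :: r2) with ht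
  have hm : v.toList ++ ['_'] <+: t := List.prefix_append _ _
  have hN : v.toList.length + 1 + b.length + 1 ≤ t.length := by simp [ht]; omega
  have hcond : ¬ ((((v.toList.length + 1 + b.length : Nat)) : Int) ≠ -1 ∧
      PySem.Set.contains pvPrefixSet
        (PySem.Chars.slice t none (some ((((v.toList.length + 1 + b.length : Nat)) : Int) + 1))) = true) := by
    rintro ⟨-, hc⟩
    obtain ⟨w, hw, heq⟩ := (pv_contains_iff _).mp hc
    have hc1 : (((v.toList.length + 1 + b.length : Nat)) : Int) + 1
        = (((v.toList.length + 1 + b.length + 1 : Nat)) : Int) := by push_cast; ring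
    rw [hc1] at heq
    simp only [PySem.Chars.slice] at heq
    rw [PySem.List.slice_to_natCast] at heq
    have hpre : w.toList ++ ['_'] <+: t := by
      rw [← heq]; exact List.take_prefix _ _
    have hwv : w = v := pv_match_uniq ((by exact hw)) hv hpre hm
    have hlen := congrArg List.length heq
    rw [List.length_take] at hlen
    simp [hwv] at hlen
    have hvt : v.toList.length = v.length := String.length_toList ..
    omega
  simp only [pvTryCands]
  rw [if_neg hcond]

-- B returns (v, rest) when the input is v ++ "_" ++ r for a known single-token verb v
theorem pv_one_case (v : String) (hv : v ∈ pvKnownVerbPrefixes) (r : List Char)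
    (hund : '_' ∉ v.toList) (hnull : (v.toList ++ ['_']) ++ r ≠ "null".toList) :
    pvBcore ((v.toList ++ ['_']) ++ r)
      = (some v, if r.isEmpty then none else some (String.ofList r)) := by
  set t := (v.toList ++ ['_']) ++ r with ht
  have hshape : t = v.toList ++ '_' :: r := by rw [ht, List.append_assoc]; rfl
  have hfind : PySem.Chars.find t ['_'] = ((v.toList.length : Nat) : Int) := by
    rw [hshape]; exact pv_find_prefix _ _ hund
  have hcast : ((v.toList.length : Nat) : Int) + 1 = (((v.toList.length + 1 : Nat)) : Int) := by
    push_cast; ring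
  have hst : v.toList.length + 1 ≤ t.length := by simp [ht]
  have hdrop : t.drop (v.toList.length + 1) = r := by rw [ht]; exact List.drop_left' (by simp)
  simp only [pvBcore, if_neg hnull, hfind, hcast]
  rw [if_neg (by omega), pv_findFrom t _ hst, hdrop]
  by_cases hr : '_' ∈ r
  · obtain ⟨b, r2, rfl, hb⟩ := pv_exists_first r hr
    rw [if_neg (by rw [pv_find_prefix _ _ hb]; omega), pv_find_prefix _ _ hb]
    have h2 : (((v.toList.length + 1 : Nat)) : Int) + ((b.length : Nat) : Int)
        = (((v.toList.length + 1 + b.length : Nat)) : Int) := by push_cast; ring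
    rw [h2, pv_try_skip v hv b r2 _, pv_try_hit v hv _ _]
  · rw [if_pos (pv_find_none r hr)]
    have : pvTryCands [(-1 : Int), ((v.toList.length : Nat) : Int)] t
        = some (some v, if r.isEmpty then none else some (String.ofList r)) := by
      simp only [pvTryCands]
      rw [if_neg (by simp)]
      exact pv_try_hit v hv r []
    rw [this]

-- B returns (v, rest) when the input is v ++ "_" ++ r for a known two-token verb v = p_q
theorem pv_two_case (v : String) (hv : v ∈ pvKnownVerbPrefixes) (p q r : List Char)
    (hp : '_' ∉ p) (hq : '_' ∉ q) (hsplit : v.toList = p ++ '_' :: q)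
    (hnull : (v.toList ++ ['_']) ++ r ≠ "null".toList) :
    pvBcore ((v.toList ++ ['_']) ++ r)
      = (some v, if r.isEmpty then none else some (String.ofList r)) := by
  set t := (v.toList ++ ['_']) ++ r with ht
  have hshape : t = p ++ '_' :: (q ++ '_' :: r) := by
    rw [ht, hsplit]; simp
  have hfind : PySem.Chars.find t ['_'] = ((p.length : Nat) : Int) := by
    rw [hshape]; exact pv_find_prefix _ _ hp
  have hcast : ((p.length : Nat) : Int) + 1 = (((p.length + 1 : Nat)) : Int) := by push_cast; ring
  have hst : p.length + 1 ≤ t.length := by simp [hshape]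
  have hdrop : t.drop (p.length + 1) = q ++ '_' :: r := by
    rw [hshape, show p ++ '_' :: (q ++ '_' :: r) = (p ++ ['_']) ++ (q ++ '_' :: r) from by simp]
    exact List.drop_left' (by simp)
  simp only [pvBcore, if_neg hnull, hfind, hcast]
  rw [if_neg (by omega), pv_findFrom t _ hst, hdrop]
  rw [if_neg (by rw [pv_find_prefix _ _ hq]; omega), pv_find_prefix _ _ hq]
  have h2 : (((p.length + 1 : Nat)) : Int) + ((q.length : Nat) : Int)
      = ((v.toList.length : Nat) : Int) := by
    rw [hsplit]; push_cast; simp; ring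
  rw [h2]
  have hhit := pv_try_hit v hv r [((p.length : Nat) : Int)]
  rw [hhit]

theorem pv_core (t : List Char) : pvAcore t = pvBcore t := by
  by_cases hnull : t = "null".toList
  · simp [pvAcore, pvBcore, hnull]
  by_cases hm : ∃ v ∈ pvKnownVerbPrefixes, v.toList ++ ['_'] <+: t
  · obtain ⟨v, hv, hpre⟩ := hm
    obtain ⟨r, rfl⟩ := hpre
    have hA : pvAcore ((v.toList ++ ['_']) ++ r)
        = (some v, if r.isEmpty then none else some (String.ofList r)) := by
      unfold pvAcore
      rw [if_neg hnull, pv_A_hit v hv r]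
    rw [hA]
    by_cases hund : '_' ∈ v.toList
    · rcases pv_two_token v hv hund with rfl | rfl | rfl
      · rw [pv_two_case _ hv "pick".toList "up".toList r (by decide) (by decide) (by decide) hnull]
      · rw [pv_two_case _ hv "hand".toList "tighten".toList r (by decide) (by decide) (by decide) hnull]
      · rw [pv_two_case _ hv "hand".toList "loosen".toList r (by decide) (by decide) (by decide) hnull]
    · rw [pv_one_case v hv r hund hnull]
  · -- no known prefix matches
    push Not at hm
    have hscan : pvScanA (PySem.List.sorted pvKnownVerbPrefixes (fun v => PySem.Str.len v) true) t = none :=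
      pv_scan_none _ t (fun v hv => hm v ((pv_mem_sorted v).mp hv))
    have htry : ∀ js, pvTryCands js t = none := fun js => pv_try_none js t hm
    by_cases hu : '_' ∈ t
    · obtain ⟨a, r, rfl, ha⟩ := pv_exists_first t hu
      have hfind : PySem.Chars.find (a ++ '_' :: r) ['_'] = ((a.length : Nat) : Int) :=
        pv_find_prefix _ _ ha
      have hisin : PySem.Chars.isIn ['_'] (a ++ '_' :: r) = true := by
        simp [PySem.Chars.isIn, hfind]
      have hcast : ((a.length : Nat) : Int) + 1 = (((a.length + 1 : Nat)) : Int) := by push_cast; ring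
      have htake : (a ++ '_' :: r).take a.length = a := by
        rw [show a ++ '_' :: r = a ++ ('_' :: r) from rfl]; exact List.take_left' rfl
      have hdrop : (a ++ '_' :: r).drop (a.length + 1) = r := by
        rw [show a ++ '_' :: r = (a ++ ['_']) ++ r from by simp]; exact List.drop_left' (by simp)
      have hA : pvAcore (a ++ '_' :: r)
          = (some (String.ofList a), if r.isEmpty then none else some (String.ofList r)) := by
        unfold pvAcore
        rw [if_neg hnull]
        simp only [hscan]
        rw [if_pos hisin, pv_splitMax_one a r ha]
        rfl
      have hB : pvBcore (a ++ '_' :: r)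
          = (some (String.ofList a), if r.isEmpty then none else some (String.ofList r)) := by
        unfold pvBcore
        rw [if_neg hnull]
        simp only [hfind]
        rw [if_neg (by omega)]
        simp only [htry]
        simp only [PySem.Chars.slice, hcast]
        rw [PySem.List.slice_to_natCast, PySem.List.slice_from_natCast, htake, hdrop]
      rw [hA, hB]
    · have hfind : PySem.Chars.find t ['_'] = -1 := pv_find_none t hu
      have hisin : PySem.Chars.isIn ['_'] t = false := by
        simp [PySem.Chars.isIn, hfind]
      have hA : pvAcore t = (some (String.ofList t), none) := by
        unfold pvAcore
        rw [if_neg hnull]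
        simp only [hscan]
        rw [if_neg (by simp [hisin])]
      have hB : pvBcore t = (some (String.ofList t), none) := by
        unfold pvBcore
        rw [if_neg hnull]
        simp only [hfind]
        simp
      rw [hA, hB]

-- ===== VERDICT (by name: the statement is the Claim_ definition above) =====
theorem infer_verb_noun_spec : Claim_equal_infer_verb_noun := by
  intro s _
  show pvAcore (pvNormalize s.toList) = pvBcore (pvNormalize s.toList)
  exact pv_core _
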